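-- pv_equiv track=rewrite | github.com/coinjinja/moosefs_exporter | moosefs_exporter.py | labelmask_to_str
-- ===== SOURCE A (Python) =====
-- def label_id_to_char(id):
--     return chr(ord('A')+id)
--
-- def labelmask_to_str(labelmask):
--     str = ""
--     m = 1
--     for i in range(26):
--         if labelmask & m:
--             str += label_id_to_char(i)
--         m <<= 1
--     return str
-- ===== SOURCE B (Python) =====
-- def labelmask_to_str(labelmask):
--     m = labelmask & 0x3FFFFFF          # keep only the 26 label bits (also makes m non-negative)
--     out = []
--     while m:
--         rest = m & (m - 1)             # m with its lowest set bit cleared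
--         low = m ^ rest                 # the lowest set bit alone (a power of two)
--         out.append(chr(ord('A') + low.bit_length() - 1))
--         m = rest
--     return "".join(out)
-- ===== Notes on version B (the rewrite author's own statement) =====
-- stated objective: alternative
-- what changed: B masks the input to the 26 label bits once and then loops only over the SET bits, extracting and clearing the lowest set bit each iteration (m & (m-1) / xor / bit_length), instead of A's fixed 26-step scan with a running mask; output order is identical because bits are extracted lowest-first.
import Mathlib
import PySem

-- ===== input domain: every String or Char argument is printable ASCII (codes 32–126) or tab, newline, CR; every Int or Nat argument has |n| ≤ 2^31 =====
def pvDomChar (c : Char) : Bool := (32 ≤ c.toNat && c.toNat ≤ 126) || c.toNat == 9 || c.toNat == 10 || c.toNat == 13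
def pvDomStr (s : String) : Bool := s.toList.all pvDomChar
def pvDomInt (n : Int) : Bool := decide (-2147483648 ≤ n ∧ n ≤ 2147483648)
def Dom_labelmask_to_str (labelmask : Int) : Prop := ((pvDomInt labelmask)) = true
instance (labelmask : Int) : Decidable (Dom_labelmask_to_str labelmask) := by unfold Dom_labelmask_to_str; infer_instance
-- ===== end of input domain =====

-- B re-traverses only the SET bits (lowest-set-bit extraction) instead of A's fixed 26-step
-- scan with a running mask; same return value, an alternative algorithm of similar cost.

-- ===== PORT A =====
-- chr(ord('A')+id); exact for the arguments 0 ≤ id < 26 this program passes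
def label_id_to_char (id : Int) : Char := Char.ofNat (65 + id).toNat

-- the body of A's for-loop; state = (characters of str so far, m)
def labelmask_to_str_body (labelmask : Int) (st : List Char × Int) (i : Int) : List Char × Int :=
  (if PySem.Int.band labelmask st.2 ≠ 0 then st.1 ++ [label_id_to_char i] else st.1,
   st.2 <<< (1 : Nat))

def labelmask_to_str (labelmask : Int) : String :=
  String.ofList ((PySem.List.pyRange 0 26).foldl (labelmask_to_str_body labelmask) ([], 1)).1

-- ===== PORT B =====
-- B's while-loop; m (the masked value) is non-negative, so it is tracked as a Nat
def labelmask_to_str_loop (m : Nat) (out : List Char) : List Char :=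
  if _h : m = 0 then out
  else
    let rest := m &&& (m - 1)
    let low := m ^^^ rest
    labelmask_to_str_loop rest (out ++ [Char.ofNat (65 + PySem.Int.bitLength (low : Int) - 1)])
termination_by m
decreasing_by have : m &&& (m - 1) ≤ m - 1 := Nat.and_le_right; omega

def labelmask_to_str_alt (labelmask : Int) : String :=
  -- m = labelmask & 0x3FFFFFF is non-negative, kept as a Nat; "".join = String.ofList
  String.ofList (labelmask_to_str_loop (PySem.Int.band labelmask 67108863).toNat [])

-- ===== PRECONDITION & SPEC =====
def Spec_labelmask_to_str (labelmask : Int) (out : String) : Prop := out = labelmask_to_str_alt labelmask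
instance (labelmask : Int) (out : String) : Decidable (Spec_labelmask_to_str labelmask out) := by unfold Spec_labelmask_to_str; infer_instance

-- ===== CLAIM (what is proved, stated in full; the proofs are below) =====
def Claim_equal_labelmask_to_str : Prop := ∀ (labelmask : Int), Dom_labelmask_to_str labelmask → Spec_labelmask_to_str labelmask (labelmask_to_str labelmask)

-- ===== LEMMAS AND PROOFS =====

-- the common reference value: the letters of the low 26 set bits, ascending
def pvRef (k : Nat) : List Char :=
  (List.range 26).filterMap (fun i => if k.testBit i then some (Char.ofNat (65 + i)) else none)

-- subtracting the overlap c &&& d from c clears exactly the bits of d, i.e. is ldiff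
theorem pv_sub_and_eq_ldiff (c d : Nat) : c - (c &&& d) = Nat.ldiff c d := by
  induction c using Nat.strong_induction_on generalizing d with
  | _ c ih =>
    by_cases h0 : c = 0
    · subst h0
      refine (Nat.eq_of_testBit_eq ?_).symm
      simp [Nat.testBit_ldiff]
    · have hc := Nat.bit_testBit_zero_shiftRight_one c
      have hd := Nat.bit_testBit_zero_shiftRight_one d
      have hlt : c >>> 1 < c := by
        have : c >>> 1 = c / 2 := Nat.shiftRight_one c
        omega
      have hand := Nat.and_le_left (n := c >>> 1) (m := d >>> 1)
      have hih := ih (c >>> 1) hlt (d >>> 1)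
      rw [← hc, ← hd, Nat.land_bit, Nat.ldiff_bit]
      cases hb : c.testBit 0 <;> cases he : d.testBit 0 <;>
        simp only [Nat.bit, Bool.and_true, Bool.and_false, Bool.not_true, Bool.not_false,
          cond_true, cond_false] <;> omega

-- Python's  x & (1 << N)  is truthy exactly when bit N of x is set
theorem pv_band_two_pow_ne_zero (x : Int) (N : Nat) :
    (PySem.Int.band x ((2 ^ N : Nat) : Int) ≠ 0) ↔ x.testBit N = true := by
  rcases x with m | m
  · rw [show ((Int.ofNat m) : Int).testBit N = m.testBit N from rfl]
    simp only [PySem.Int.band, Int.ofNat_eq_natCast]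
    rw [if_pos (by positivity), if_pos (by positivity)]
    simp only [Int.toNat_natCast, Nat.and_two_pow]
    cases h : m.testBit N <;> simp
  · rw [show (Int.negSucc m).testBit N = !m.testBit N from rfl]
    simp only [PySem.Int.band]
    rw [if_neg (by omega), if_pos (by positivity)]
    have h1 : (-(Int.negSucc m) - 1).toNat = m := by simp [Int.negSucc_eq]
    rw [h1, Int.toNat_natCast, Nat.and_comm, Nat.and_two_pow]
    cases h : m.testBit N <;> simp

-- bit i of the masked value  x & 0x3FFFFFF  (as a Nat)
theorem pv_band_mask_testBit (x : Int) (i : Nat) :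
    (PySem.Int.band x 67108863).toNat.testBit i = (x.testBit i && decide (i < 26)) := by
  have hM : (67108863 : Nat) = 2 ^ 26 - 1 := by norm_num
  rcases x with m | m
  · rw [show ((Int.ofNat m) : Int).testBit i = m.testBit i from rfl]
    simp only [PySem.Int.band, Int.ofNat_eq_natCast]
    rw [if_pos (by positivity), if_pos (by norm_num)]
    rw [Int.toNat_natCast, Int.toNat_natCast]
    rw [show ((67108863:Int).toNat) = (67108863:Nat) from rfl]
    rw [Nat.testBit_land, hM, Nat.testBit_two_pow_sub_one]
  · rw [show (Int.negSucc m).testBit i = !m.testBit i from rfl]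
    simp only [PySem.Int.band]
    rw [if_neg (by omega), if_pos (by norm_num)]
    have h1 : (-(Int.negSucc m) - 1).toNat = m := by simp [Int.negSucc_eq]
    rw [h1]
    rw [show ((67108863:Int).toNat) = (67108863:Nat) from rfl, Int.toNat_natCast,
      pv_sub_and_eq_ldiff, Nat.testBit_ldiff, hM, Nat.testBit_two_pow_sub_one]
    cases h : m.testBit i <;> cases hd : decide (i < 26) <;> simp_all

-- Python bit_length of a power of two
theorem pv_bitLength_two_pow (i : Nat) : PySem.Int.bitLength ((2 ^ i : Nat) : Int) = i + 1 := by
  have h1 := PySem.Int.lt_two_pow_bitLength ((2 ^ i : Nat) : Int)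
  have h2 := PySem.Int.two_pow_bitLength_le ((2 ^ i : Nat) : Int) (by positivity)
  rw [Int.natAbs_natCast] at h1 h2
  have hi1 : i < PySem.Int.bitLength ((2 ^ i : Nat) : Int) :=
    (Nat.pow_lt_pow_iff_right (by norm_num)).mp h1
  have hi2 : PySem.Int.bitLength ((2 ^ i : Nat) : Int) - 1 ≤ i :=
    (Nat.pow_le_pow_iff_right (by norm_num)).mp h2
  omega

-- the lowest set bit of a nonzero k, as produced by  k ^^^ (k &&& (k-1))
theorem pv_lowbit (k : Nat) (hk : k ≠ 0) :
    ∃ i, k.testBit i = true ∧ (∀ j, j < i → k.testBit j = false) ∧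
      k ^^^ (k &&& (k - 1)) = 2 ^ i := by
  induction k using Nat.strong_induction_on with
  | _ k ih =>
    have hbit := Nat.bit_testBit_zero_shiftRight_one k
    have hsr : k >>> 1 = k / 2 := Nat.shiftRight_one k
    cases hb : k.testBit 0 with
    | true =>
      refine ⟨0, hb, by omega, ?_⟩
      rw [hb] at hbit
      rw [← hbit]
      have h1 : Nat.bit true (k >>> 1) - 1 = Nat.bit false (k >>> 1) := by
        simp [Nat.bit]
      rw [h1, Nat.land_bit, Nat.xor_bit]
      simp [Nat.bit]
    | false =>
      rw [hb] at hbit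
      have ha : k >>> 1 ≠ 0 := by
        intro h; rw [h] at hbit; simp [Nat.bit] at hbit; omega
      have hlt : k >>> 1 < k := by omega
      obtain ⟨i, h1, h2, h3⟩ := ih (k >>> 1) hlt ha
      refine ⟨i + 1, ?_, ?_, ?_⟩
      · rw [Nat.testBit_succ, ← hsr]; exact h1
      · intro j hj
        cases j with
        | zero => exact hb
        | succ j => rw [Nat.testBit_succ, ← hsr]; exact h2 j (by omega)
      · rw [← hbit]
        have hm1 : Nat.bit false (k >>> 1) - 1 = Nat.bit true (k >>> 1 - 1) := by
          simp [Nat.bit]; omega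
        rw [hm1, Nat.land_bit, Nat.xor_bit]
        simp only [Bool.false_and, bne_self_eq_false]
        simp only [Nat.bit, cond_false]
        rw [h3, pow_succ]
        ring

theorem pv_filterMap_range'_split (f g : Nat → Option Char) (c : Char) (i s n : Nat)
    (hin : i < s + n) (hsi : s ≤ i)
    (hlow : ∀ j, j < i → f j = none) (hfi : f i = some c)
    (hgi : ∀ j, j ≤ i → g j = none) (hhigh : ∀ j, i < j → f j = g j) :
    (List.range' s n).filterMap f = c :: (List.range' s n).filterMap g := by
  induction n generalizing s with
  | zero => omega
  | succ n ihn =>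
    rw [List.range'_succ]
    rcases eq_or_lt_of_le hsi with rfl | hlt
    · simp only [List.filterMap_cons, hfi, hgi s le_rfl]
      congr 1
      apply List.filterMap_congr
      intro x hx
      obtain ⟨t, _, rfl⟩ := List.mem_range'.mp hx
      exact hhigh _ (by omega)
    · simp only [List.filterMap_cons, hlow s hlt, hgi s (le_of_lt hlt)]
      exact ihn (s + 1) (by omega) hlt

-- B's loop produces the reference list when no bit ≥ 26 is set
theorem pv_loop_eq (k : Nat) (hk : ∀ i, 26 ≤ i → k.testBit i = false) (out : List Char) :
    labelmask_to_str_loop k out = out ++ pvRef k := by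
  induction k using Nat.strong_induction_on generalizing out with
  | _ k ih =>
    by_cases h0 : k = 0
    · subst h0
      rw [labelmask_to_str_loop]
      simp [pvRef]
    · obtain ⟨i, hbi, hlowb, hxor⟩ := pv_lowbit k h0
      have hi26 : i < 26 := by
        by_contra h
        rw [hk i (by omega)] at hbi
        cases hbi
      have hrest_lt : k &&& (k - 1) < k := by
        have : k &&& (k - 1) ≤ k - 1 := Nat.and_le_right
        omega
      have hrestbit : ∀ j, (k &&& (k - 1)).testBit j = (k.testBit j && !(decide (i = j))) := by
        intro j
        have h := congrArg (fun t => t.testBit j) hxor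
        simp only [Nat.testBit_xor, Nat.testBit_two_pow] at h
        cases hkj : k.testBit j <;> cases hrj : (k &&& (k - 1)).testBit j <;>
          simp_all
      have hk' : ∀ j, 26 ≤ j → (k &&& (k - 1)).testBit j = false := by
        intro j hj
        rw [hrestbit j, hk j hj, Bool.false_and]
      rw [labelmask_to_str_loop]
      simp only [h0, dite_false]
      rw [hxor, pv_bitLength_two_pow]
      rw [ih (k &&& (k - 1)) hrest_lt hk']
      rw [List.append_assoc]
      congr 1
      have hchar : 65 + (i + 1) - 1 = 65 + i := by omega
      rw [hchar]
      unfold pvRef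
      rw [List.range_eq_range']
      rw [pv_filterMap_range'_split (fun j => if k.testBit j then some (Char.ofNat (65 + j)) else none)
            (fun j => if (k &&& (k - 1)).testBit j then some (Char.ofNat (65 + j)) else none)
            (Char.ofNat (65 + i)) i 0 26 (by omega) (by omega)
            (fun j hj => by simp [hlowb j hj])
            (by simp [hbi])
            (fun j hj => by
              rcases eq_or_lt_of_le hj with rfl | hlt
              · simp [hrestbit]
              · simp [hrestbit, hlowb j hlt])
            (fun j hj => by simp only [hrestbit j, show ¬ i = j from by omega, decide_false,
              Bool.not_false, Bool.and_true])]
      simp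

-- A's fold, generalized over the trip count
theorem pv_foldA (x : Int) (N : Nat) :
    (PySem.List.pyRange 0 (N : Int)).foldl (labelmask_to_str_body x) ([], 1) =
      ((List.range N).filterMap
        (fun i => if x.testBit i then some (Char.ofNat (65 + i)) else none),
       ((2 ^ N : Nat) : Int)) := by
  induction N with
  | zero => rfl
  | succ N ihN =>
    rw [show ((N + 1 : Nat) : Int) = (N : Int) + 1 by push_cast; ring]
    rw [PySem.List.pyRange_one_succ_right (by positivity)]
    rw [List.foldl_append, ihN]
    simp only [List.foldl_cons, List.foldl_nil, labelmask_to_str_body]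
    rw [List.range_succ, List.filterMap_append]
    simp only [Prod.mk.injEq]
    refine ⟨?_, ?_⟩
    · by_cases hb : x.testBit N
      · rw [if_pos ((pv_band_two_pow_ne_zero x N).mpr hb)]
        have hch : label_id_to_char ((N : Nat) : Int) = Char.ofNat (65 + N) := by
          unfold label_id_to_char
          norm_cast
        simp [hb, hch]
      · rw [if_neg (by rw [pv_band_two_pow_ne_zero x N]; exact hb)]
        simp [hb]
    · rw [Int.shiftLeft_eq]
      push_cast [pow_succ]
      ring

theorem pv_A_eq (x : Int) :
    labelmask_to_str x =
      String.ofList ((List.range 26).filterMap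
        (fun i => if x.testBit i then some (Char.ofNat (65 + i)) else none)) := by
  unfold labelmask_to_str
  rw [show (26 : Int) = ((26 : Nat) : Int) by norm_num, pv_foldA]

theorem pv_B_eq (x : Int) :
    labelmask_to_str_alt x = String.ofList (pvRef (PySem.Int.band x 67108863).toNat) := by
  unfold labelmask_to_str_alt
  rw [pv_loop_eq _ (fun i hi => by rw [pv_band_mask_testBit]; simp; omega) []]
  rfl

-- ===== VERDICT (by name: the statement is the Claim_ definition above) =====
theorem labelmask_to_str_spec : Claim_equal_labelmask_to_str := by
  unfold Claim_equal_labelmask_to_str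
  intro x _
  unfold Spec_labelmask_to_str
  rw [pv_A_eq, pv_B_eq]
  congr 1
  unfold pvRef
  apply List.filterMap_congr
  intro i hi
  have hi26 : i < 26 := List.mem_range.mp hi
  rw [pv_band_mask_testBit]
  simp [hi26]
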